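-- pv_equiv track=rewrite | github.com/InfiniteWing/Solves | zerojudge.tw/a624.py | chk3
-- ===== SOURCE A (Python) =====
-- def chk3(pwd):
--     w = False
--     m = False
--     for c in pwd:
--         if(c.isalpha()):
--             w = True
--         else:
--             m = True
--     return w&m
-- ===== SOURCE B (Python) =====
-- def chk3(pwd):
--     return any(c.isalpha() for c in pwd) and any(not c.isalpha() for c in pwd)
-- ===== Notes on version B (the rewrite author's own statement) =====
-- stated objective: idiomatic
-- what changed: Replaced the flag-maintaining single loop with two independent short-circuiting any() scans, one for a letter and one for a non-letter.
import Mathlib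
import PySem

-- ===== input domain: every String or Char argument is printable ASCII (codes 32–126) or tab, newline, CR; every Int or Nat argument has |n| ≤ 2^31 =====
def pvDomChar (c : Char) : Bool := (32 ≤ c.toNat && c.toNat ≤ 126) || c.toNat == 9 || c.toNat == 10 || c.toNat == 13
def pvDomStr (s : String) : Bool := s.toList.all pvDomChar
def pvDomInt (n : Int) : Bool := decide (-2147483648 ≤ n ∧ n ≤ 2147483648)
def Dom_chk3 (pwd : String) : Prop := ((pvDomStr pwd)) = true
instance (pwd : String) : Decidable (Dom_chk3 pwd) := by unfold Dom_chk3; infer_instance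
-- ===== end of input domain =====

-- B replaces A's single flag-maintaining loop by two independent short-circuiting `any` scans (idiomatic decomposition; same cost).

-- ===== PORT A =====
-- one pass, maintaining the two flags w (saw a letter) and m (saw a non-letter), returning w & m
def chk3 (pwd : String) : Bool :=
  let st := pwd.toList.foldl
    (fun (st : Bool × Bool) c =>
      if PySem.Chars.isalpha c then (true, st.2) else (st.1, true))
    (false, false)
  st.1 && st.2

-- ===== PORT B =====
-- two scans: any letter, and any non-letter
def chk3_alt (pwd : String) : Bool :=
  (pwd.toList.any (fun c => PySem.Chars.isalpha c)) &&
  (pwd.toList.any (fun c => !PySem.Chars.isalpha c))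

-- ===== PRECONDITION & SPEC =====
def Spec_chk3 (pwd : String) (out : Bool) : Prop := out = chk3_alt pwd
instance (pwd : String) (out : Bool) : Decidable (Spec_chk3 pwd out) := by unfold Spec_chk3; infer_instance

-- ===== CLAIM (what is proved, stated in full; the proofs are below) =====
def Claim_equal_chk3 : Prop := ∀ (pwd : String), Dom_chk3 pwd → Spec_chk3 pwd (chk3 pwd)

-- ===== LEMMAS AND PROOFS =====

theorem chk3_fold_char (l : List Char) (w m : Bool) :
    l.foldl (fun (st : Bool × Bool) c =>
      if PySem.Chars.isalpha c then (true, st.2) else (st.1, true)) (w, m)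
    = (w || l.any (fun c => PySem.Chars.isalpha c),
       m || l.any (fun c => !PySem.Chars.isalpha c)) := by
  induction l generalizing w m with
  | nil => simp
  | cons c t ih =>
    simp only [List.foldl_cons, List.any_cons]
    by_cases h : PySem.Chars.isalpha c = true
    · simp [h, ih]
    · simp only [Bool.not_eq_true] at h
      simp [h, ih]

-- ===== VERDICT (by name: the statement is the Claim_ definition above) =====
theorem chk3_spec : Claim_equal_chk3 := by
  intro pwd _
  unfold Spec_chk3 chk3 chk3_alt
  simp [chk3_fold_char]
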